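-- pv_equiv track=rewrite | github.com/mskozlova/advent_of_code | 2023/day13/day13_pt1.py | find_row_symmetry
-- ===== SOURCE A (Python) =====
-- def find_row_symmetry(pattern):
--     total_rows = len(pattern)
--
--     for symmetry_row in range(total_rows - 1):
--         is_symmetrical = True
--         for i in range(min(symmetry_row + 1, total_rows - symmetry_row - 1)):
--             if pattern[symmetry_row - i] != pattern[symmetry_row + 1 + i]:
--                 is_symmetrical = False
--                 break
--
--         if is_symmetrical:
--             return symmetry_row
--
--     return None
-- ===== SOURCE B (Python) =====
-- def find_row_symmetry(pattern):
--     # Manacher-style even-palindrome radii over the rows, then pick the first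
--     # axis whose mirror reaches the nearer edge.
--     n = len(pattern)
--     d = [0] * n  # d[c] = radius of the longest even palindrome centered at the gap before row c
--     l, r = 0, -1
--     for c in range(n):
--         k = 0
--         if c <= r:
--             k = min(d[l + r + 1 - c], r - c + 1)
--         while c + k < n and c - k - 1 >= 0 and pattern[c + k] == pattern[c - k - 1]:
--             k += 1
--         d[c] = k
--         if c + k - 1 > r:
--             l, r = c - k, c + k - 1
--     for idx in range(n - 1):
--         if d[idx + 1] >= min(idx + 1, n - 1 - idx):
--             return idx
--     return None
-- ===== Notes on version B (the rewrite author's own statement) =====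
-- stated objective: alternative
-- what changed: B replaces A's axis-by-axis scan (re-checking every mirrored row pair at each candidate axis, worst-case quadratic) by Manacher's even-palindrome algorithm: one left-to-right pass computes all mirror radii, reusing the radius of the mirrored center inside the current rightmost palindrome, then a second pass picks the first axis whose radius reaches the nearer edge; worst-case comparisons drop from O(n^2) to O(n) rows, though on random patterns A already exits early so wall-clock is similar.
import Mathlib
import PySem

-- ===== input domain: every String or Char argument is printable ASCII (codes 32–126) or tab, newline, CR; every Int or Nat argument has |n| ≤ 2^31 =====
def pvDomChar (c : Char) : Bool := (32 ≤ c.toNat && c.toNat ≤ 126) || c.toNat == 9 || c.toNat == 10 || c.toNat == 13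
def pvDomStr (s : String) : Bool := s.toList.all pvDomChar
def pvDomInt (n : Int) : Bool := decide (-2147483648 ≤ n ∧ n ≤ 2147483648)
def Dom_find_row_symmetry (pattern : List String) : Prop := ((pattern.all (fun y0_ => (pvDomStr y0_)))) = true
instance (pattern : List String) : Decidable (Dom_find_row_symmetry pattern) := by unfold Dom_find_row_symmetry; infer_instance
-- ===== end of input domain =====

-- B replaces A's axis-by-axis mirror scan by Manacher's even-palindrome radii in one
-- pass, then picks the first axis whose radius reaches the nearer edge
-- (objective: alternative algorithm; measured wall-clock is similar).

-- ===== PORT A =====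
-- inner 'for i in range(…)' with the break-on-mismatch flag
def aCheck (pattern : List String) (sr : Int) : List Int → Bool
  | [] => true
  | i :: rest =>
    if PySem.List.pyGet? pattern (sr - i) ≠ PySem.List.pyGet? pattern (sr + 1 + i) then false
    else aCheck pattern sr rest

-- outer 'for symmetry_row in range(total_rows - 1)' with the early return
def aLoop (pattern : List String) : List Int → Option Int
  | [] => none
  | sr :: rest =>
    if aCheck pattern sr (PySem.List.pyRange 0 (min (sr + 1) ((pattern.length : Int) - sr - 1)) 1)
    then some sr
    else aLoop pattern rest

def find_row_symmetry (pattern : List String) : Option Int :=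
  aLoop pattern (PySem.List.pyRange 0 ((pattern.length : Int) - 1) 1)

-- ===== PORT B =====
-- 'while c + k < n and c - k - 1 >= 0 and pattern[c + k] == pattern[c - k - 1]: k += 1'
def bWhile (pattern : List String) (n c k : Int) : Int :=
  if h : (decide (c + k < n) && decide (0 ≤ c - k - 1)
          && (PySem.List.pyGet? pattern (c + k) == PySem.List.pyGet? pattern (c - k - 1))) = true
  then bWhile pattern n c (k + 1)
  else k
termination_by (n - c - k).toNat
decreasing_by
  simp only [Bool.and_eq_true, decide_eq_true_eq] at h
  omega

-- 'for c in range(n)' maintaining (d, l, r)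
def bManLoop (pattern : List String) (n : Int) :
    List Int → List Int × Int × Int → List Int × Int × Int
  | [], st => st
  | c :: rest, (d, l, r) =>
    let k0 : Int := if c ≤ r then min (PySem.List.pyGetD d (l + r + 1 - c) 0) (r - c + 1) else 0
    let k := bWhile pattern n c k0
    let d' := PySem.List.pySetD d c k
    let lr' := if c + k - 1 > r then ((c - k, c + k - 1) : Int × Int) else (l, r)
    bManLoop pattern n rest (d', lr'.1, lr'.2)

-- 'for idx in range(n - 1)' with the early return
def bFindLoop (d : List Int) (n : Int) : List Int → Option Int
  | [] => none
  | idx :: rest =>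
    if PySem.List.pyGetD d (idx + 1) 0 ≥ min (idx + 1) (n - 1 - idx) then some idx
    else bFindLoop d n rest

def find_row_symmetry_alt (pattern : List String) : Option Int :=
  let n : Int := (pattern.length : Int)
  let st := bManLoop pattern n (PySem.List.pyRange 0 n 1)
      (List.replicate pattern.length (0 : Int), 0, -1)
  bFindLoop st.1 n (PySem.List.pyRange 0 (n - 1) 1)

-- ===== PRECONDITION & SPEC =====
def Spec_find_row_symmetry (pattern : List String) (out : Option Int) : Prop := out = find_row_symmetry_alt pattern
instance (pattern : List String) (out : Option Int) : Decidable (Spec_find_row_symmetry pattern out) := by unfold Spec_find_row_symmetry; infer_instance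

-- ===== CLAIM (what is proved, stated in full; the proofs are below) =====
def Claim_equal_find_row_symmetry : Prop := ∀ (pattern : List String), Dom_find_row_symmetry pattern → Spec_find_row_symmetry pattern (find_row_symmetry pattern)

-- ===== LEMMAS AND PROOFS =====

-- 'the mirror can be extended from radius k to k + 1 at the gap before row c'
def canExt (p : List String) (c k : Nat) : Bool :=
  decide (c + k < p.length) && decide (k < c) && (p[c + k]? == p[c - k - 1]?)

theorem canExt_self_false (p : List String) (c : Nat) : canExt p c c = false := by
  simp [canExt]

-- the exact even-palindrome radius at the gap before row c
def rad (p : List String) (c : Nat) : Nat :=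
  Nat.find (p := fun k => canExt p c k = false) ⟨c, canExt_self_false p c⟩

theorem rad_spec (p : List String) (c : Nat) : canExt p c (rad p c) = false :=
  Nat.find_spec (p := fun k => canExt p c k = false) ⟨c, canExt_self_false p c⟩

theorem rad_min (p : List String) (c : Nat) {j : Nat} (hj : j < rad p c) :
    canExt p c j = true := by
  have := Nat.find_min (p := fun k => canExt p c k = false) ⟨c, canExt_self_false p c⟩ hj
  simpa using this

theorem le_rad_of_all (p : List String) (c k : Nat)
    (h : ∀ j < k, canExt p c j = true) : k ≤ rad p c := by
  by_contra hlt
  have := h (rad p c) (by omega)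
  rw [rad_spec] at this
  exact Bool.false_ne_true this

theorem rad_le (p : List String) (c : Nat) : rad p c ≤ c := by
  by_contra h
  have := rad_min p c (j := c) (by omega)
  rw [canExt_self_false] at this
  exact Bool.false_ne_true this

theorem rad_bound (p : List String) (c : Nat) (hc : c ≤ p.length) :
    c + rad p c ≤ p.length := by
  rcases Nat.eq_zero_or_pos (rad p c) with h0 | h1
  · omega
  · have := rad_min p c (j := rad p c - 1) (by omega)
    simp only [canExt, Bool.and_eq_true, decide_eq_true_eq] at this
    omega

theorem canExt_eq_of_lt (p : List String) (c j : Nat)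
    (h1 : c + j < p.length) (h2 : j < c) :
    canExt p c j = (p[c + j]? == p[c - j - 1]?) := by
  simp [canExt, h1, h2]

-- the Int-level while condition is canExt
theorem cond_eq_canExt (p : List String) (c k : Nat) :
    (decide ((c : Int) + (k : Int) < (p.length : Int)) && decide (0 ≤ (c : Int) - (k : Int) - 1)
      && (PySem.List.pyGet? p ((c : Int) + (k : Int)) == PySem.List.pyGet? p ((c : Int) - (k : Int) - 1)))
    = canExt p c k := by
  by_cases hb : c + k < p.length ∧ k < c
  · obtain ⟨h1, h2⟩ := hb
    have e1 : (c : Int) + (k : Int) = ((c + k : Nat) : Int) := by push_cast; ring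
    have e2 : (c : Int) - (k : Int) - 1 = ((c - k - 1 : Nat) : Int) := by omega
    have d1 : decide ((c : Int) + (k : Int) < (p.length : Int)) = true := decide_eq_true (by omega)
    have d2 : decide ((0 : Int) ≤ (c : Int) - (k : Int) - 1) = true := decide_eq_true (by omega)
    rw [d1, d2, Bool.true_and, Bool.true_and, e1, e2,
        PySem.List.pyGet?_natCast, PySem.List.pyGet?_natCast, canExt_eq_of_lt p c k h1 h2]
  · rcases Decidable.not_and_iff_not_or_not.mp hb with h | h
    · have hi : decide ((c : Int) + (k : Int) < (p.length : Int)) = false := decide_eq_false (by omega)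
      rw [hi]
      simp [canExt, h]
    · have hi : decide ((0 : Int) ≤ (c : Int) - (k : Int) - 1) = false := decide_eq_false (by omega)
      rw [hi]
      simp [canExt, h]

-- the while loop, started from any radius known to be valid, computes the exact radius
theorem bWhile_eq_rad (p : List String) (c : Nat) :
    ∀ (fuel k0 : Nat), rad p c - k0 ≤ fuel → (∀ j < k0, canExt p c j = true) →
      bWhile p (p.length : Int) (c : Int) (k0 : Int) = (rad p c : Int) := by
  intro fuel
  induction fuel with
  | zero =>
    intro k0 hf h0
    have hle : k0 ≤ rad p c := le_rad_of_all p c k0 h0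
    have hk : k0 = rad p c := by omega
    rw [bWhile, dif_neg]
    · exact congrArg _ hk
    · rw [cond_eq_canExt, hk, rad_spec]
      exact Bool.false_ne_true
  | succ m ih =>
    intro k0 hf h0
    have hle : k0 ≤ rad p c := le_rad_of_all p c k0 h0
    by_cases hext : canExt p c k0 = true
    · have hlt : k0 < rad p c := by
        rcases Nat.lt_or_ge k0 (rad p c) with h | h
        · exact h
        · have : k0 = rad p c := by omega
          rw [this, rad_spec] at hext; exact absurd hext Bool.false_ne_true
      rw [bWhile, dif_pos]
      · have e : (k0 : Int) + 1 = ((k0 + 1 : Nat) : Int) := by push_cast; ring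
        rw [e]
        exact ih (k0 + 1) (by omega) (by
          intro j hj
          rcases Nat.lt_or_ge j k0 with h | h
          · exact h0 j h
          · have : j = k0 := by omega
            rwa [this])
      · rw [cond_eq_canExt]; exact hext
    · have hk : k0 = rad p c := by
        rcases Nat.lt_or_ge k0 (rad p c) with h | h
        · exact absurd (rad_min p c h) hext
        · omega
      rw [bWhile, dif_neg]
      · exact congrArg _ hk
      · rw [cond_eq_canExt, hk, rad_spec]; exact Bool.false_ne_true

-- rows inside the palindrome around the gap before c0 mirror across it
theorem pal_sym (p : List String) (c0 : Nat) (x : Nat)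
    (hl : c0 - rad p c0 ≤ x) (hr : x < c0 + rad p c0) :
    p[x]? = p[2 * c0 - 1 - x]? := by
  rcases Nat.lt_or_ge x c0 with hx | hx
  · -- x on the left side: x = c0 - t - 1 with t = c0 - 1 - x < rad
    have ht : c0 - 1 - x < rad p c0 := by
      have := rad_le p c0; omega
    have := rad_min p c0 ht
    simp only [canExt, Bool.and_eq_true, decide_eq_true_eq, beq_iff_eq] at this
    have e1 : c0 - (c0 - 1 - x) - 1 = x := by
      have := rad_le p c0; omega
    have e2 : c0 + (c0 - 1 - x) = 2 * c0 - 1 - x := by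
      have := rad_le p c0; omega
    rw [e1, e2] at this
    exact this.2.symm
  · -- x on the right side: x = c0 + t with t = x - c0 < rad
    have ht : x - c0 < rad p c0 := by omega
    have := rad_min p c0 ht
    simp only [canExt, Bool.and_eq_true, decide_eq_true_eq, beq_iff_eq] at this
    have e1 : c0 + (x - c0) = x := by omega
    have e2 : c0 - (x - c0) - 1 = 2 * c0 - 1 - x := by
      have := rad_le p c0; omega
    rw [e1, e2] at this
    exact this.2

-- Manacher's seed: inside the rightmost palindrome, min(rad of the mirrored
-- center, distance to the right edge) is a valid starting radius
theorem seed_valid (p : List String) (c0 c : Nat) (hc0 : c0 < c)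
    (hcr : c < c0 + rad p c0) (hn : c0 ≤ p.length) :
    ∀ j < min (rad p (2 * c0 - c)) (c0 + rad p c0 - c), canExt p c j = true := by
  intro j hj
  set K := rad p c0 with hK
  set m := 2 * c0 - c with hm
  have hKc0 : K ≤ c0 := rad_le p c0
  have hKn : c0 + K ≤ p.length := rad_bound p c0 hn
  have hj1 : j < rad p m := by omega
  have hj2 : j < c0 + K - c := by omega
  have hm1 : 1 ≤ m := by omega
  have hbound1 : c + j < p.length := by omega
  have hbound2 : j < c := by omega
  rw [canExt_eq_of_lt p c j hbound1 hbound2, beq_iff_eq]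
  -- p[c+j]? = p[m-j-1]?  via the big palindrome
  have e1 : p[c + j]? = p[m - j - 1]? := by
    have := pal_sym p c0 (c + j) (by omega) (by omega)
    rwa [show 2 * c0 - 1 - (c + j) = m - j - 1 by omega] at this
  -- p[c-j-1]? = p[m+j]?  via the big palindrome
  have e2 : p[c - j - 1]? = p[m + j]? := by
    have := pal_sym p c0 (c - j - 1) (by omega) (by omega)
    rwa [show 2 * c0 - 1 - (c - j - 1) = m + j by omega] at this
  -- p[m+j]? = p[m-j-1]?  via the mirrored center's own radius
  have e3 : p[m + j]? = p[m - j - 1]? := by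
    have := rad_min p m hj1
    simp only [canExt, Bool.and_eq_true, decide_eq_true_eq, beq_iff_eq] at this
    exact this.2
  rw [e1, e2, e3]

-- the invariant carried through Manacher's main loop
def ManInv (p : List String) (c : Nat) (d : List Int) (l r : Int) : Prop :=
  d.length = p.length ∧
  (∀ m : Nat, m < c → PySem.List.pyGetD d (m : Int) 0 = (rad p m : Int)) ∧
  ((l = 0 ∧ r = -1) ∨
    ∃ c0 : Nat, c0 < c ∧ l = (c0 : Int) - (rad p c0 : Int) ∧ r = (c0 : Int) + (rad p c0 : Int) - 1)

-- one step of the main loop computes rad c and preserves the invariant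
theorem man_go (p : List String) :
    ∀ (fuel c : Nat) (d : List Int) (l r : Int),
      p.length - c ≤ fuel → c ≤ p.length → ManInv p c d l r →
      (bManLoop p (p.length : Int) (PySem.List.pyRange (c : Int) (p.length : Int) 1) (d, l, r)).1.length = p.length ∧
      (∀ m : Nat, m < p.length →
        PySem.List.pyGetD (bManLoop p (p.length : Int) (PySem.List.pyRange (c : Int) (p.length : Int) 1) (d, l, r)).1 (m : Int) 0 = (rad p m : Int)) := by
  intro fuel
  induction fuel with
  | zero =>
    intro c d l r hf hc hinv
    have hceq : c = p.length := by omega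
    rw [PySem.List.pyRange_one_eq_nil (by omega)]
    exact ⟨hinv.1, fun m hm => hinv.2.1 m (by omega)⟩
  | succ fm ih =>
    intro c d l r hf hc hinv
    rcases Nat.eq_or_lt_of_le hc with hceq | hclt
    · rw [PySem.List.pyRange_one_eq_nil (by omega)]
      exact ⟨hinv.1, fun m hm => hinv.2.1 m (by omega)⟩
    · rw [PySem.List.pyRange_one_cons (by exact_mod_cast hclt)]
      obtain ⟨hlen, hd, hlr⟩ := hinv
      simp only [bManLoop]
      -- the computed k is rad c
      have hk : bWhile p (p.length : Int)  (c : Int)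
          (if (c : Int) ≤ r then min (PySem.List.pyGetD d (l + r + 1 - (c : Int)) 0) (r - (c : Int) + 1) else 0)
          = (rad p c : Int) := by
        by_cases hcr : (c : Int) ≤ r
        · rcases hlr with ⟨hl0, hr0⟩ | ⟨c0, hc0c, hl0, hr0⟩
          · rw [hr0] at hcr; omega
          · have hK1 : (c : Int) < (c0 : Int) + (rad p c0 : Int) := by omega
            have hKc0 : rad p c0 ≤ c0 := rad_le p c0
            have hcc0 : c0 < c := hc0c
            have hmN : (2 * c0 - c : Nat) < c := by omega
            have hme : l + r + 1 - (c : Int) = ((2 * c0 - c : Nat) : Int) := by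
              rw [hl0, hr0]; omega
            rw [if_pos hcr, hme, hd _ hmN]
            have hmin : min ((rad p (2 * c0 - c) : Nat) : Int) (r - (c : Int) + 1)
                = ((min (rad p (2 * c0 - c)) (c0 + rad p c0 - c) : Nat) : Int) := by
              rw [hr0]; omega
            rw [hmin]
            exact bWhile_eq_rad p c (rad p c) _ (by omega)
              (fun j hj => seed_valid p c0 c hcc0 (by omega) (by omega) j hj)
        · rw [if_neg hcr]
          exact bWhile_eq_rad p c (rad p c) 0 (by omega) (fun j hj => by omega)
      rw [hk]
      -- new state satisfies the invariant at c + 1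
      have hset : PySem.List.pySetD d (c : Int) (rad p c : Int) = d.set c (rad p c : Int) :=
        PySem.List.pySetD_natCast d c _
      have hlen' : (PySem.List.pySetD d (c : Int) (rad p c : Int)).length = p.length := by
        rw [hset, List.length_set]; exact hlen
      have hd' : ∀ m : Nat, m < c + 1 →
          PySem.List.pyGetD (PySem.List.pySetD d (c : Int) (rad p c : Int)) (m : Int) 0 = (rad p m : Int) := by
        intro m hm
        rw [PySem.List.pyGetD_pySetD_natCast d c m (rad p c : Int) 0 (by omega)]
        by_cases hmc : m = c
        · rw [if_pos hmc, hmc]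
        · rw [if_neg hmc]
          exact hd m (by omega)
      have hlr' : ∀ l' r' : Int,
          (l', r') = (if (c : Int) + (rad p c : Int) - 1 > r then (((c : Int) - (rad p c : Int), (c : Int) + (rad p c : Int) - 1) : Int × Int) else (l, r)) →
          ((l' = 0 ∧ r' = -1) ∨ ∃ c0 : Nat, c0 < c + 1 ∧ l' = (c0 : Int) - (rad p c0 : Int) ∧ r' = (c0 : Int) + (rad p c0 : Int) - 1) := by
        intro l' r' heq
        by_cases hupd : (c : Int) + (rad p c : Int) - 1 > r
        · rw [if_pos hupd] at heq
          right
          exact ⟨c, by omega, by rw [Prod.mk.injEq] at heq; omega, by rw [Prod.mk.injEq] at heq; omega⟩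
        · rw [if_neg hupd] at heq
          rw [Prod.mk.injEq] at heq
          rcases hlr with ⟨h1, h2⟩ | ⟨c0, hc0, h1, h2⟩
          · left; exact ⟨by omega, by omega⟩
          · right; exact ⟨c0, by omega, by omega, by omega⟩
      have hrec := ih (c + 1)
          (PySem.List.pySetD d (c : Int) (rad p c : Int))
          (if (c : Int) + (rad p c : Int) - 1 > r then (((c : Int) - (rad p c : Int), (c : Int) + (rad p c : Int) - 1) : Int × Int) else (l, r)).1
          (if (c : Int) + (rad p c : Int) - 1 > r then (((c : Int) - (rad p c : Int), (c : Int) + (rad p c : Int) - 1) : Int × Int) else (l, r)).2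
          (by omega) (by omega)
          ⟨hlen', hd', hlr' _ _ rfl⟩
      have hcast : ((c : Int) + 1) = ((c + 1 : Nat) : Int) := by push_cast; ring
      rw [hcast]
      exact hrec

-- A's break-on-mismatch inner loop is the 'all' of its comparisons
theorem aCheck_eq_all (pattern : List String) (sr : Int) (l : List Int) :
    aCheck pattern sr l
      = l.all (fun i => PySem.List.pyGet? pattern (sr - i) == PySem.List.pyGet? pattern (sr + 1 + i)) := by
  induction l with
  | nil => rfl
  | cons i rest ih =>
    simp only [aCheck, List.all_cons, ih]
    by_cases h : PySem.List.pyGet? pattern (sr - i) = PySem.List.pyGet? pattern (sr + 1 + i) <;>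
      simp [h]

-- A's inner check holds iff the rows mirror around the axis below row j
theorem aSide_iff (p : List String) (j m : Nat) (hmj : m ≤ j + 1) :
    (aCheck p (j : Int) (PySem.List.pyRange 0 (m : Int) 1) = true)
      ↔ ∀ i < m, p[j-i]? = p[j+1+i]? := by
  rw [aCheck_eq_all, PySem.List.pyRange_zero_natCast, List.all_map, List.all_eq_true]
  simp only [List.mem_range, Function.comp_apply, beq_iff_eq]
  constructor
  · intro h i hi
    have := h i hi
    rwa [show (j:Int) - (i:Int) = ((j - i : Nat) : Int) by omega,
         show (j:Int) + 1 + (i:Int) = ((j + 1 + i : Nat) : Int) by omega,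
         PySem.List.pyGet?_natCast, PySem.List.pyGet?_natCast] at this
  · intro h i hi
    rw [show (j:Int) - (i:Int) = ((j - i : Nat) : Int) by omega,
        show (j:Int) + 1 + (i:Int) = ((j + 1 + i : Nat) : Int) by omega,
        PySem.List.pyGet?_natCast, PySem.List.pyGet?_natCast]
    exact h i hi

-- the radius reaching the nearer edge is exactly A's per-axis mirror check
theorem cond_bridge (p : List String) (j : Nat) (hj : j + 1 < p.length) :
    aCheck p (j : Int)
        (PySem.List.pyRange 0 (min ((j : Int) + 1) ((p.length : Int) - (j : Int) - 1)) 1)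
      = decide ((rad p (j + 1) : Int) ≥ min ((j : Int) + 1) ((p.length : Int) - 1 - (j : Int))) := by
  set m := min (j + 1) (p.length - 1 - j) with hm
  have hm1 : 1 ≤ m := by omega
  have hmj : m ≤ j + 1 := by omega
  have hmn : j + 1 + m ≤ p.length := by omega
  have hmInt : min ((j : Int) + 1) ((p.length : Int) - (j : Int) - 1) = (m : Int) := by omega
  have hmInt2 : min ((j : Int) + 1) ((p.length : Int) - 1 - (j : Int)) = (m : Int) := by omega
  rw [hmInt, hmInt2, Bool.eq_iff_iff, aSide_iff p j m hmj, decide_eq_true_iff]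
  constructor
  · intro h
    have : m ≤ rad p (j + 1) := by
      apply le_rad_of_all
      intro i hi
      rw [canExt_eq_of_lt p (j + 1) i (by omega) (by omega), beq_iff_eq,
          show j + 1 - i - 1 = j - i by omega]
      exact (h i hi).symm
    omega
  · intro h i hi
    have := rad_min p (j + 1) (show i < rad p (j + 1) by omega)
    rw [canExt_eq_of_lt p (j + 1) i (by omega) (by omega), beq_iff_eq,
        show j + 1 - i - 1 = j - i by omega] at this
    exact this.symm

-- the two outer loops pick the same first axis when their conditions agree pointwise
theorem loops_eq (p : List String) (d : List Int) (l : List Int)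
    (h : ∀ idx ∈ l, aCheck p idx (PySem.List.pyRange 0 (min (idx + 1) ((p.length : Int) - idx - 1)) 1)
        = decide (PySem.List.pyGetD d (idx + 1) 0 ≥ min (idx + 1) ((p.length : Int) - 1 - idx))) :
    aLoop p l = bFindLoop d (p.length : Int) l := by
  induction l with
  | nil => rfl
  | cons idx rest ih =>
    simp only [aLoop, bFindLoop, h idx (List.mem_cons_self),
      ih (fun i hi => h i (List.mem_cons_of_mem _ hi)), decide_eq_true_eq]

-- ===== VERDICT (by name: the statement is the Claim_ definition above) =====
theorem find_row_symmetry_spec : Claim_equal_find_row_symmetry := by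
  intro pattern _
  unfold Spec_find_row_symmetry find_row_symmetry find_row_symmetry_alt
  have hman := man_go pattern pattern.length 0
      (List.replicate pattern.length (0 : Int)) 0 (-1) (by omega) (by omega)
      ⟨by simp, fun m hm => by omega, Or.inl ⟨rfl, rfl⟩⟩
  rw [show ((0 : Nat) : Int) = (0 : Int) from rfl] at hman
  apply loops_eq
  intro idx hidx
  rw [PySem.List.mem_pyRange_one] at hidx
  obtain ⟨h0, h1⟩ := hidx
  have hj : idx = ((idx.toNat : Nat) : Int) := by omega
  have hjl : idx.toNat + 1 < pattern.length := by omega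
  rw [hj]
  rw [show ((idx.toNat : Nat) : Int) + 1 = ((idx.toNat + 1 : Nat) : Int) by push_cast; ring,
      hman.2 (idx.toNat + 1) (by omega)]
  exact cond_bridge pattern idx.toNat hjl
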